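-- pv_equiv track=rewrite | github.com/ozendelait/naphash | cifar10_trainer.py | reduce_to
-- ===== SOURCE A (Python) =====
-- def get_cat(p):
--     return p.split('/')[-2]
--
-- def reduce_to(cifar10_paths, max_num=5000, per_cat={}, idx_train=10000):
--     train_paths, cnt_num = [], {}
--     for p in cifar10_paths[idx_train:]:
--         cat = get_cat(p)
--         if cnt_num.get(cat,0) >= per_cat.get(cat,max_num):
--             continue
--         train_paths.append(p)
--         cnt_num[cat] = cnt_num.get(cat,0)+1
--     return cifar10_paths[:idx_train]+train_paths
-- ===== SOURCE B (Python) =====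
-- def get_cat(p):
--     return p.split('/')[-2]
--
-- def reduce_to(cifar10_paths, max_num=5000, per_cat={}, idx_train=10000):
--     head = cifar10_paths[:idx_train]
--     tail = cifar10_paths[idx_train:]
--     groups = {}
--     for i, p in enumerate(tail):
--         groups.setdefault(get_cat(p), []).append(i)
--     kept = set()
--     for cat, idxs in groups.items():
--         kept.update(idxs[:max(per_cat.get(cat, max_num), 0)])
--     return head + [tail[i] for i in sorted(kept)]
-- ===== Notes on version B (the rewrite author's own statement) =====
-- stated objective: alternative
-- what changed: B replaces A's single streaming pass with a mutated per-category counter by a staged group-then-select algorithm: it first groups the tail indices by category into a dict, then per category keeps only the first per_cat.get(cat, max_num) indices into a kept set, and finally re-emits the tail elements at the sorted kept indices.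
import Mathlib
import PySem

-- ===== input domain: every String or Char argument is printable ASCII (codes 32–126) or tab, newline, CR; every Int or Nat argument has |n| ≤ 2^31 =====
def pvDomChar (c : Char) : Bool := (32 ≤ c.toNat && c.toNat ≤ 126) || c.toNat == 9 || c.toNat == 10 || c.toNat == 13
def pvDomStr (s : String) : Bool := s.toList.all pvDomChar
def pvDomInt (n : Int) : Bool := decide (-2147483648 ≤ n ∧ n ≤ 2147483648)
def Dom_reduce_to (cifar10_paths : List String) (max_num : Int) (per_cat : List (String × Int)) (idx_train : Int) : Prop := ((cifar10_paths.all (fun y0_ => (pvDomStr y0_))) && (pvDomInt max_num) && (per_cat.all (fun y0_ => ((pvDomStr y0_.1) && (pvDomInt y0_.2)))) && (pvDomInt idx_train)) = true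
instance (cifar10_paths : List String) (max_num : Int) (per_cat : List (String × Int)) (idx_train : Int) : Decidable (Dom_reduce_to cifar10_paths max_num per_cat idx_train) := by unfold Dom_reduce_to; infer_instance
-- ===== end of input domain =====

-- B replaces A's streaming pass with a running per-category counter by a staged
-- group-then-select algorithm: group tail indices by category, keep the first
-- per_cat.get(cat, max_num) indices of each category, re-emit the tail at the
-- sorted kept indices (objective: alternative).

-- ===== PORT A =====
-- get_cat(p) = p.split('/')[-2]; the [-2] index raises IndexError when p has no '/',
-- those inputs are excluded by Pre_ below; the port defaults to "" there.
def catD (p : String) : String :=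
  (PySem.List.pyGet? ((PySem.Str.split? p "/").getD []) (-2)).getD ""

-- per_cat.get(cat, max_num): first-match lookup in the association list
def capOf (per_cat : List (String × Int)) (max_num : Int) (cat : String) : Int :=
  ((per_cat.find? (fun q => q.1 == cat)).map (·.2)).getD max_num

def stepA (per_cat : List (String × Int)) (max_num : Int)
    (st : List String × PySem.Dict String Int) (p : String) :
    List String × PySem.Dict String Int :=
  let cat := catD p
  if capOf per_cat max_num cat ≤ st.2.getD cat 0 then st
  else (st.1 ++ [p], st.2.insert cat (st.2.getD cat 0 + 1))

def reduce_to (cifar10_paths : List String) (max_num : Int) (per_cat : List (String × Int)) (idx_train : Int) : List String :=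
  PySem.List.slice cifar10_paths none (some idx_train) ++
    ((PySem.List.slice cifar10_paths (some idx_train) none).foldl
       (stepA per_cat max_num) ([], PySem.Dict.empty)).1

-- ===== PORT B =====
def reduce_to_alt (cifar10_paths : List String) (max_num : Int) (per_cat : List (String × Int)) (idx_train : Int) : List String :=
  let head := PySem.List.slice cifar10_paths none (some idx_train)
  let tail := PySem.List.slice cifar10_paths (some idx_train) none
  -- groups.setdefault(get_cat(p), []).append(i)
  let groups : PySem.Dict String (List Int) :=
    (PySem.List.enumerate tail).foldl
      (fun d ip => d.modify (catD ip.2) [] (fun idxs => idxs ++ [ip.1])) PySem.Dict.empty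
  -- kept.update(idxs[:max(per_cat.get(cat, max_num), 0)])
  let kept : PySem.Set Int :=
    groups.items.foldl
      (fun s ci => PySem.Set.update s
        (PySem.List.slice ci.2 none (some (max (capOf per_cat max_num ci.1) 0)))) PySem.Set.empty
  head ++ (PySem.List.sorted kept (fun x => x) false).map
      (fun i => (PySem.List.pyGet? tail i).getD "")

-- ===== PRECONDITION & SPEC =====
-- Pre_ excludes exactly the inputs where A raises: some path in the tail slice has no '/',
-- so p.split('/')[-2] is an IndexError.
def Pre_reduce_to (cifar10_paths : List String) (max_num : Int) (per_cat : List (String × Int)) (idx_train : Int) : Prop :=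
  ∀ p ∈ PySem.List.slice cifar10_paths (some idx_train) none, PySem.Str.isIn "/" p = true

instance (cifar10_paths : List String) (max_num : Int) (per_cat : List (String × Int)) (idx_train : Int) : Decidable (Pre_reduce_to cifar10_paths max_num per_cat idx_train) := by unfold Pre_reduce_to; infer_instance

def pvWitness_reduce_to : List String × Int × (List (String × Int)) × Int :=
  (["head.txt", "a/x/1.png", "a/x/2.png", "b/y/3.png"], 1, [("x", 2)], 1)

def Spec_reduce_to (cifar10_paths : List String) (max_num : Int) (per_cat : List (String × Int)) (idx_train : Int) (out : List String) : Prop := out = reduce_to_alt cifar10_paths max_num per_cat idx_train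
instance (cifar10_paths : List String) (max_num : Int) (per_cat : List (String × Int)) (idx_train : Int) (out : List String) : Decidable (Spec_reduce_to cifar10_paths max_num per_cat idx_train out) := by unfold Spec_reduce_to; infer_instance

-- ===== CLAIM (what is proved, stated in full; the proofs are below) =====
def Claim_equal_reduce_to : Prop := ∀ (cifar10_paths : List String) (max_num : Int) (per_cat : List (String × Int)) (idx_train : Int), Dom_reduce_to cifar10_paths max_num per_cat idx_train → Pre_reduce_to cifar10_paths max_num per_cat idx_train → Spec_reduce_to cifar10_paths max_num per_cat idx_train (reduce_to cifar10_paths max_num per_cat idx_train)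

-- ===== LEMMAS AND PROOFS =====

-- A-SIDE: characterise A's loop as a filter over the enumerated tail.
-- reference recursion: keep p iff its category's occurrence count in the prefix is below the cap
def keepF (per_cat : List (String × Int)) (max_num : Int) (pref : List String) : List String → List String
  | [] => []
  | p :: rs =>
    if ((pref.map catD).count (catD p) : Int) < capOf per_cat max_num (catD p)
    then p :: keepF per_cat max_num (pref ++ [p]) rs
    else keepF per_cat max_num (pref ++ [p]) rs

lemma count_map_append_self (pref : List String) (p : String) :
    (((pref ++ [p]).map catD).count (catD p) : Int)
      = ((pref.map catD).count (catD p) : Int) + 1 := by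
  simp [List.count_append]

lemma count_map_append_ne (pref : List String) (p : String) (c : String)
    (h : catD p ≠ c) :
    (((pref ++ [p]).map catD).count c : Int) = ((pref.map catD).count c : Int) := by
  simp [List.count_append, h]

lemma foldA_eq_keepF (per_cat : List (String × Int)) (max_num : Int)
    (rest : List String) :
    ∀ (pref acc : List String) (cnt : PySem.Dict String Int),
    (∀ c, cnt.getD c 0 = min ((pref.map catD).count c : Int) (max (capOf per_cat max_num c) 0)) →
    (rest.foldl (stepA per_cat max_num) (acc, cnt)).1
      = acc ++ keepF per_cat max_num pref rest := by
  induction rest with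
  | nil => intro pref acc cnt _; simp [keepF]
  | cons p rs ih =>
    intro pref acc cnt hinv
    have hc := hinv (catD p)
    have hnn : (0:Int) ≤ ((pref.map catD).count (catD p) : Int) := by positivity
    by_cases h : capOf per_cat max_num (catD p) ≤ cnt.getD (catD p) 0
    · -- skipped: the cap is already reached
      have hk : ¬ (((pref.map catD).count (catD p) : Int) < capOf per_cat max_num (catD p)) := by
        omega
      simp only [List.foldl_cons, keepF, if_neg hk, stepA, if_pos h]
      refine ih (pref ++ [p]) acc cnt ?_
      intro c
      by_cases hcc : catD p = c
      · subst hcc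
        rw [count_map_append_self]
        omega
      · rw [count_map_append_ne _ _ _ hcc]
        exact hinv c
    · -- kept
      have hk : ((pref.map catD).count (catD p) : Int) < capOf per_cat max_num (catD p) := by
        omega
      simp only [List.foldl_cons, keepF, if_pos hk, stepA, if_neg h]
      rw [ih (pref ++ [p]) (acc ++ [p]) _ ?_]
      · simp
      · intro c
        by_cases hcc : catD p = c
        · subst hcc
          rw [count_map_append_self, PySem.Dict.getD_insert_self]
          omega
        · rw [count_map_append_ne _ _ _ hcc,
              PySem.Dict.getD_insert_of_ne _ _ _ (fun hh => hcc hh.symm)]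
          exact hinv c

lemma keepF_eq_filter (per_cat : List (String × Int)) (max_num : Int)
    (rest : List String) :
    ∀ (pref : List String),
    keepF per_cat max_num pref rest
      = ((PySem.List.enumerate rest (pref.length : Int)).filter (fun ip =>
          decide ((((((pref ++ rest).map catD)).take ip.1.toNat).count
                    (((pref ++ rest).map catD).getD ip.1.toNat "") : Int) <
                  capOf per_cat max_num (((pref ++ rest).map catD).getD ip.1.toNat "")))).map (·.2) := by
  induction rest with
  | nil => intro pref; simp [keepF, PySem.List.enumerate_nil]
  | cons p rs ih =>
    intro pref
    have htake : ((pref ++ p :: rs).map catD).take ((pref.length : Int)).toNat = pref.map catD := by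
      simp [List.map_append]
    have hget : ((pref ++ p :: rs).map catD).getD ((pref.length : Int)).toNat "" = catD p := by
      simp [List.map_append, List.getD_eq_getElem?_getD]
    rw [keepF, PySem.List.enumerate_cons, List.filter_cons]
    simp only [decide_eq_true_eq, htake, hget]
    have hsh : (pref.length : Int) + 1 = ((pref ++ [p]).length : Int) := by simp
    have happ : pref ++ p :: rs = (pref ++ [p]) ++ rs := by simp
    by_cases hcond : ((pref.map catD).count (catD p) : Int) < capOf per_cat max_num (catD p)
    · rw [if_pos hcond, if_pos hcond]
      simp only [List.map_cons]
      rw [hsh, happ, ih (pref ++ [p])]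
    · rw [if_neg hcond, if_neg hcond]
      rw [hsh, happ, ih (pref ++ [p])]

-- B-SIDE helpers

-- the ordered list of tail indices (starting at s) whose element has category c
def idxList (tail : List String) (s : Int) (c : String) : List Int :=
  ((PySem.List.enumerate tail s).filter (fun ip => catD ip.2 == c)).map (·.1)

-- membership in the first k of a category's index list = the rank condition
lemma mem_take_idxList (c : String) :
    ∀ (tail : List String) (s : Int) (k : Nat) (x : Int),
    (x ∈ (idxList tail s c).take k) ↔
    ∃ (i : Nat), ∃ _ : i < tail.length, x = s + i ∧ catD tail[i] = c ∧
      (tail.take i).countP (fun p => catD p == c) < k := by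
  intro tail
  induction tail with
  | nil => intro s k x; simp [idxList, PySem.List.enumerate_nil]
  | cons p rs ih =>
    intro s k x
    by_cases hp : catD p = c
    · rw [idxList, PySem.List.enumerate_cons, List.filter_cons,
        if_pos (by simpa using hp)]
      cases k with
      | zero => simp
      | succ k' =>
        simp only [List.map_cons, List.take_succ_cons, List.mem_cons]
        rw [show ((PySem.List.enumerate rs (s+1)).filter (fun ip => catD ip.2 == c)).map (·.1) = idxList rs (s+1) c from rfl, ih (s+1) k' x]
        constructor
        · rintro (rfl | ⟨j, hj, rfl, hc, hcnt⟩)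
          · exact ⟨0, by simp, by simp, hp, by simp⟩
          · refine ⟨j+1, by simp only [List.length_cons]; omega, by push_cast; ring, by simpa using hc, ?_⟩
            simp only [List.take_succ_cons, List.countP_cons, hp, beq_self_eq_true, if_true]
            omega
        · rintro ⟨i, hi, rfl, hc, hcnt⟩
          cases i with
          | zero => left; simp
          | succ j =>
            right
            refine ⟨j, by simp only [List.length_cons] at hi; omega, by push_cast; ring, by simpa using hc, ?_⟩
            simp only [List.take_succ_cons, List.countP_cons, hp, beq_self_eq_true, if_true] at hcnt
            omega
    · rw [idxList, PySem.List.enumerate_cons, List.filter_cons,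
        if_neg (by simpa using hp)]
      rw [show ((PySem.List.enumerate rs (s+1)).filter (fun ip => catD ip.2 == c)).map (·.1) = idxList rs (s+1) c from rfl, ih (s+1) k x]
      constructor
      · rintro ⟨j, hj, rfl, hc, hcnt⟩
        refine ⟨j+1, by simp only [List.length_cons]; omega, by push_cast; ring, by simpa using hc, ?_⟩
        have hne : (catD p == c) = false := by simpa using hp
        simp only [List.take_succ_cons, List.countP_cons, hne]
        simpa using hcnt
      · rintro ⟨i, hi, rfl, hc, hcnt⟩
        cases i with
        | zero => exact absurd (by simpa using hc) hp
        | succ j =>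
          refine ⟨j, by simp only [List.length_cons] at hi; omega, by push_cast; ring, by simpa using hc, ?_⟩
          have hne : (catD p == c) = false := by simpa using hp
          simp only [List.take_succ_cons, List.countP_cons, hne] at hcnt
          simpa using hcnt

-- membership in the fold of set-updates
lemma mem_foldl_update {α β : Type} [BEq α] [LawfulBEq α] (l : List β) (f : β → List α) :
    ∀ (s : PySem.Set α) (y : α),
    (y ∈ l.foldl (fun s b => PySem.Set.update s (f b)) s) ↔ y ∈ s ∨ ∃ b ∈ l, y ∈ f b := by
  induction l with
  | nil => simp
  | cons b bs ih =>
    intro s y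
    rw [List.foldl_cons, ih, PySem.Set.mem_update]
    constructor
    · rintro ((h | h) | ⟨b', hb', h⟩)
      · exact Or.inl h
      · exact Or.inr ⟨b, List.mem_cons_self, h⟩
      · exact Or.inr ⟨b', List.mem_cons_of_mem _ hb', h⟩
    · rintro (h | ⟨b', hb', h⟩)
      · exact Or.inl (Or.inl h)
      · rcases List.mem_cons.1 hb' with rfl | hb'
        · exact Or.inl (Or.inr h)
        · exact Or.inr ⟨b', hb', h⟩

lemma nodup_foldl_update {α β : Type} [BEq α] [LawfulBEq α] (l : List β) (f : β → List α) :
    ∀ (s : PySem.Set α), s.Nodup →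
    (l.foldl (fun s b => PySem.Set.update s (f b)) s).Nodup := by
  induction l with
  | nil => intro s h; simpa
  | cons b bs ih =>
    intro s h
    exact ih _ (PySem.Set.nodup_update _ _ h)

-- the groups dict looks up to the category's ordered index list
lemma groups_getD (tail : List String) (c : String) :
    ((PySem.List.enumerate tail 0).foldl
      (fun d ip => d.modify (catD ip.2) [] (fun idxs => idxs ++ [ip.1]))
      PySem.Dict.empty).getD c []
    = idxList tail 0 c := by
  have h := PySem.Dict.getD_foldl_modify_append
      (l := (PySem.List.enumerate tail 0).map (fun ip => (catD ip.2, ip.1)))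
      (d := (PySem.Dict.empty : PySem.Dict String (List Int))) (c := c)
  rw [List.foldl_map] at h
  simpa [idxList, List.filter_map, List.map_map, Function.comp] using h

-- keys of the groups dict = the distinct categories of the tail
lemma groups_keys (tail : List String) :
    ((PySem.List.enumerate tail 0).foldl
      (fun d ip => d.modify (catD ip.2) [] (fun idxs => idxs ++ [ip.1]))
      (PySem.Dict.empty : PySem.Dict String (List Int))).keys
    = PySem.Set.ofList (tail.map catD) := by
  rw [PySem.Dict.keys_foldl_modify_key]
  have : (PySem.List.enumerate tail 0).map (fun ip => catD ip.2) = tail.map catD := by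
    rw [show (fun (ip : Int × String) => catD ip.2) = catD ∘ (fun ip => ip.2) from rfl,
        ← List.map_map, PySem.List.map_snd_enumerate]
  simp [this, PySem.Set.update_nil_left]

-- ===== VERDICT =====
theorem reduce_to_spec : Claim_equal_reduce_to := by
  intro paths mx pc it _ _
  unfold Spec_reduce_to
  simp only [reduce_to, reduce_to_alt]
  set tail := PySem.List.slice paths (some it) none with htail
  congr 1
  -- A side: filter characterisation
  rw [foldA_eq_keepF pc mx tail [] [] PySem.Dict.empty
      (by intro c; simp [PySem.Dict.getD_empty]),
      keepF_eq_filter pc mx tail []]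
  simp only [List.nil_append, List.length_nil, Nat.cast_zero]
  set g := (PySem.List.enumerate tail 0).foldl
      (fun d ip => d.modify (catD ip.2) [] (fun idxs => idxs ++ [ip.1]))
      (PySem.Dict.empty : PySem.Dict String (List Int)) with hg
  have hnodk : g.keys.Nodup := by
    rw [hg]; exact PySem.Dict.nodup_keys_foldl_modify_key _ _ _ _ _ PySem.Dict.nodup_keys_empty
  set F := (PySem.List.enumerate tail 0).filter (fun ip =>
      decide ((((tail.map catD).take ip.1.toNat).count ((tail.map catD).getD ip.1.toNat "") : Int) <
        capOf pc mx ((tail.map catD).getD ip.1.toNat ""))) with hF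
  set kept := g.items.foldl
      (fun s ci => PySem.Set.update s
        (PySem.List.slice ci.2 none (some (max (capOf pc mx ci.1) 0)))) PySem.Set.empty with hkept
  -- membership characterisation of kept
  have hmemkept : ∀ x : Int, x ∈ kept ↔
      ∃ c ∈ g.keys, x ∈ (idxList tail 0 c).take (max (capOf pc mx c) 0).toNat := by
    intro x
    rw [hkept, mem_foldl_update]
    simp only [PySem.Set.empty, List.not_mem_nil, false_or]
    constructor
    · rintro ⟨ci, hci, hx⟩
      refine ⟨ci.1, PySem.Dict.mem_keys_of_mem_items g hci, ?_⟩
      have h2 : g.get? ci.1 = some ci.2 := by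
        rcases ci with ⟨cc, ll⟩; exact PySem.Dict.get?_of_mem_items g hci hnodk
      have h3 : ci.2 = idxList tail 0 ci.1 := by
        rw [← groups_getD tail ci.1, ← hg, PySem.Dict.getD_eq_get?_getD, h2]; rfl
      rwa [h3, PySem.List.slice_to _ (le_max_right _ _)] at hx
    · rintro ⟨c, hc, hx⟩
      refine ⟨(c, g.getD c []), ?_, ?_⟩
      · rw [PySem.Dict.items_eq_map_keys g hnodk []]
        exact List.mem_map.2 ⟨c, hc, rfl⟩
      · rw [PySem.List.slice_to _ (le_max_right _ _)]
        show x ∈ (g.getD c []).take _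
        rw [hg, groups_getD tail c]
        exact hx
  -- membership characterisation of F.map fst
  have hmemF : ∀ x : Int, x ∈ F.map (·.1) ↔
      ∃ c ∈ g.keys, x ∈ (idxList tail 0 c).take (max (capOf pc mx c) 0).toNat := by
    intro x
    rw [hg, groups_keys]
    constructor
    · rintro hx
      rcases List.mem_map.1 hx with ⟨ip, hip, rfl⟩
      rcases List.mem_filter.1 hip with ⟨hipE, hcond⟩
      rcases (PySem.List.mem_enumerate_iff _ _ _).1 hipE with ⟨k, hk, rfl⟩
      simp only [decide_eq_true_eq, zero_add, Int.toNat_natCast] at hcond ⊢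
      have hgd : (tail.map catD).getD k "" = catD tail[k] := by
        simp [List.getD_eq_getElem?_getD, hk]
      rw [hgd] at hcond
      refine ⟨catD tail[k], ?_, ?_⟩
      · exact (PySem.Set.mem_ofList _ _).2 (List.mem_map.2 ⟨tail[k], by simp, rfl⟩)
      · rw [(mem_take_idxList _ tail 0 _ _)]
        refine ⟨k, hk, by simp, rfl, ?_⟩
        have hcnt : ((tail.map catD).take k).count (catD tail[k])
            = (tail.take k).countP (fun p => catD p == (catD tail[k] : String)) := by
          rw [← List.map_take, List.count_eq_countP, List.countP_map]; rfl
        rw [hcnt] at hcond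
        have hmx : (((max (capOf pc mx (catD tail[k])) 0).toNat : Int))
            = max (capOf pc mx (catD tail[k])) 0 := Int.toNat_of_nonneg (le_max_right _ _)
        omega
    · rintro ⟨c, hc, hx⟩
      rcases (mem_take_idxList c tail 0 _ _).1 hx with ⟨i, hi, rfl, hcat, hcnt⟩
      refine List.mem_map.2 ⟨((0:Int) + i, tail[i]), List.mem_filter.2 ⟨?_, ?_⟩, rfl⟩
      · exact (PySem.List.mem_enumerate_iff _ _ _).2 ⟨i, hi, rfl⟩
      · simp only [decide_eq_true_eq, zero_add, Int.toNat_natCast]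
        have hgd : (tail.map catD).getD i "" = catD tail[i] := by
          simp [List.getD_eq_getElem?_getD, hi]
        rw [hgd, hcat]
        have hcnt2 : ((tail.map catD).take i).count c
            = (tail.take i).countP (fun p => catD p == c) := by
          rw [← List.map_take, List.count_eq_countP, List.countP_map]; rfl
        rw [hcnt2]
        have hmx : (((max (capOf pc mx c) 0).toNat : Int))
            = max (capOf pc mx c) 0 := Int.toNat_of_nonneg (le_max_right _ _)
        omega
  -- sorted kept = F.map fst
  have hpwF : (F.map (·.1)).Pairwise (· < ·) := by
    rw [List.pairwise_map]
    exact (PySem.List.pairwise_lt_enumerate tail 0).filter _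
  have hndF : (F.map (·.1)).Nodup := hpwF.imp (fun h => ne_of_lt h)
  have hndK : kept.Nodup := by
    rw [hkept]; exact nodup_foldl_update _ _ _ List.nodup_nil
  have hperm : (F.map (·.1)).Perm kept :=
    (List.perm_ext_iff_of_nodup hndF hndK).2 (fun x => (hmemF x).trans (hmemkept x).symm)
  have hsorted : PySem.List.sorted kept (fun x => x) false = F.map (·.1) :=
    PySem.List.sorted_eq_of_perm_of_pairwise_lt kept (F.map (·.1)) (fun x => x) hperm (by simpa using hpwF)
  rw [hsorted, List.map_map]
  refine (List.map_congr_left ?_).symm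
  intro ip hip
  rcases (PySem.List.mem_enumerate_iff _ _ _).1 (List.mem_filter.1 hip).1 with ⟨k, hk, rfl⟩
  simp [hk]
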